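-- pv_equiv track=rewrite | github.com/Erikad94/AdventOfCode | Day6/day6.py | CountAndRemove
-- ===== SOURCE A (Python) =====
-- def CountAndRemove(answers, numOfPeople):
--     count = 0
--     while len(answers)> 0:
--         numAnswers = answers.count(answers[0])
--         if(numAnswers == numOfPeople):
--             count+=1
--         answers = answers.replace(answers[0], '')
--     return count
-- ===== SOURCE B (Python) =====
-- def CountAndRemove(answers, numOfPeople):
--     freq = {}
--     for ch in answers:
--         freq[ch] = freq.get(ch, 0) + 1
--     count = 0
--     for v in freq.values():
--         if v == numOfPeople:
--             count += 1
--     return count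
-- ===== Notes on version B (the rewrite author's own statement) =====
-- stated objective: idiomatic
-- what changed: Replaced A's destructive count-then-remove-all-occurrences rescan loop with a single-pass frequency dictionary followed by a scan over its values.
import Mathlib
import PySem

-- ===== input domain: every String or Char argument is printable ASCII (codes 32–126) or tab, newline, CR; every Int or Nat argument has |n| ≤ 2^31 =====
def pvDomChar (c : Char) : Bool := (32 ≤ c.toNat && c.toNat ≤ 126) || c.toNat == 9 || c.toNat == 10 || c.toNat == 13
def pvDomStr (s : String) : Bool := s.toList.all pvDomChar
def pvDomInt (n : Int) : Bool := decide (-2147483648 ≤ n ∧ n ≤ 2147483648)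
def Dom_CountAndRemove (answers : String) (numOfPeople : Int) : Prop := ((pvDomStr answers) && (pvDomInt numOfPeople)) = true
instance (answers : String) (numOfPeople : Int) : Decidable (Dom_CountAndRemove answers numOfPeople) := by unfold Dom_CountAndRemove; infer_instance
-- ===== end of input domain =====

-- B replaces A's destructive count-then-remove-first-char rescan loop with a single-pass
-- frequency dictionary followed by a scan over its values (idiomatic tabulation).


-- ===== PORT A =====
-- A's while loop over the shrinking string, on the character list.  answers.count(answers[0])
-- with a ONE-character needle is exactly List.count of the head, and
-- answers.replace(answers[0], '') is exactly filtering that character out (both exact for a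
-- single-character pattern).
def pvLoopA (l : List Char) (n : Int) (count : Int) : Int :=
  match l with
  | [] => count
  | h :: t =>
      let numAnswers : Int := ((h :: t).count h : Int)
      let count' := if numAnswers = n then count + 1 else count
      pvLoopA (t.filter (fun c => !(c == h))) n count'
termination_by l.length
decreasing_by
  simpa [List.length_unattach] using
    Nat.lt_succ_of_le (le_trans (List.length_filter_le _ _) (by simp))

def CountAndRemove (answers : String) (numOfPeople : Int) : Int :=
  pvLoopA answers.toList numOfPeople 0

-- ===== PORT B =====
-- Source B: build freq = {ch: occurrences} in one pass, then count the values equal to numOfPeople.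
def CountAndRemove_alt (answers : String) (numOfPeople : Int) : Int :=
  let freq : PySem.Dict Char Int :=
    answers.toList.foldl (fun d ch => d.insert ch (d.getD ch 0 + 1)) PySem.Dict.empty
  freq.values.foldl (fun count v => if v == numOfPeople then count + 1 else count) 0

-- ===== PRECONDITION & SPEC =====
def Spec_CountAndRemove (answers : String) (numOfPeople : Int) (out : Int) : Prop := out = CountAndRemove_alt answers numOfPeople
instance (answers : String) (numOfPeople : Int) (out : Int) : Decidable (Spec_CountAndRemove answers numOfPeople out) := by unfold Spec_CountAndRemove; infer_instance

-- ===== CLAIM (what is proved, stated in full; the proofs are below) =====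
def Claim_equal_CountAndRemove : Prop := ∀ (answers : String) (numOfPeople : Int), Dom_CountAndRemove answers numOfPeople → Spec_CountAndRemove answers numOfPeople (CountAndRemove answers numOfPeople)

-- ===== LEMMAS AND PROOFS =====

-- Removing every copy of the head and re-fronting it is, up to permutation, the set of a cons.
theorem pvSetCons (h : Char) (t : List Char) :
    (PySem.Set.ofList (h :: t)).Perm (h :: PySem.Set.ofList (t.filter (fun c => !(c == h)))) := by
  apply (List.perm_ext_iff_of_nodup (PySem.Set.nodup_ofList _) ?_).2
  · intro x
    simp [PySem.Set.mem_ofList]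
    by_cases hx : x = h <;> simp [hx]
  · refine List.nodup_cons.2 ⟨?_, PySem.Set.nodup_ofList _⟩
    intro hmem
    have := List.of_mem_filter ((PySem.Set.mem_ofList _ _).1 hmem)
    simp at this

-- A's loop counts the distinct characters of l whose multiplicity in l equals n.
theorem pvLoopA_eq (N : Nat) : ∀ (l : List Char), l.length ≤ N → ∀ (n c : Int),
    pvLoopA l n c = c + ((PySem.Set.ofList l).countP (fun k => ((l.count k : Int) == n)) : Int) := by
  induction N with
  | zero =>
      intro l hl n c
      have : l = [] := List.length_eq_zero_iff.1 (Nat.le_zero.1 hl)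
      subst this
      simp [pvLoopA, PySem.Set.ofList]
  | succ N ih =>
      intro l hl n c
      match l with
      | [] => simp [pvLoopA, PySem.Set.ofList]
      | h :: t =>
        rw [pvLoopA]
        rw [show ∀ a b : Int, (if ((h :: t).count h : Int) = n then a else b) = (if (t.count h : Int) + 1 = n then a else b) from by
              intro a b; congr 1; simp [List.count_cons_self]]
        rw [ih _ (le_trans (List.length_filter_le _ _) (by simpa using hl))]
        rw [(pvSetCons h t).countP_eq]
        rw [List.countP_cons]
        have hcong : (PySem.Set.ofList (t.filter (fun c => !(c == h)))).countP
              (fun k => (((t.filter (fun c => !(c == h))).count k : Int) == n))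
            = (PySem.Set.ofList (t.filter (fun c => !(c == h)))).countP
              (fun k => (((h :: t).count k : Int) == n)) := by
          apply List.countP_congr
          intro k hk
          have hk' : k ∈ t.filter (fun c => !(c == h)) := (PySem.Set.mem_ofList _ _).1 hk
          have hne : k ≠ h := by
            have := List.of_mem_filter hk'
            simpa using this
          rw [List.count_filter (by simpa using hne), List.count_cons_of_ne (Ne.symm hne)]
        rw [hcong]
        set X := (PySem.Set.ofList (t.filter (fun c => !(c == h)))).countP
            (fun k => (((h :: t).count k : Int) == n)) with hX
        have hc1 : ((h :: t).count h : Int) = (t.count h : Int) + 1 := by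
          simp [List.count_cons_self]
        by_cases hv : (((h :: t).count h : Int)) = n
        · rw [if_pos (show ((List.count h t : Int)) + 1 = n by omega),
              if_pos (show (((h :: t).count h : Int) == n) = true by simpa using hv)]
          push_cast; ring
        · rw [if_neg (show ¬(((List.count h t : Int)) + 1 = n) by omega),
              if_neg (show ¬((((h :: t).count h : Int) == n) = true) by simpa using hv)]
          push_cast; ring

-- B computes the same count: its dict is Counter(answers), whose values are the multiplicities
-- of the distinct characters.
theorem pvAlt_eq (answers : String) (n : Int) :
    CountAndRemove_alt answers n
      = 0 + (((PySem.Set.ofList answers.toList).countP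
          (fun k => ((answers.toList.count k : Int) == n))) : Int) := by
  unfold CountAndRemove_alt
  rw [PySem.Dict.foldl_insert_getD_add_one_eq_counter]
  rw [PySem.List.foldl_beq_add_one]
  congr 1
  simp [PySem.Dict.values, PySem.Dict.items_counter, List.count, List.countP_map]
  rfl

-- ===== VERDICT (by name: the statement is the Claim_ definition above) =====
theorem CountAndRemove_spec : Claim_equal_CountAndRemove := by
  intro answers numOfPeople _
  unfold Spec_CountAndRemove CountAndRemove
  rw [pvLoopA_eq answers.toList.length answers.toList le_rfl, pvAlt_eq]
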